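-- pv_equiv track=rewrite | github.com/michaelayoade/platform-core | app/modules/health/service.py | get_overall_status
-- ===== SOURCE A (Python) =====
-- from typing import Any, Dict, List
--
-- def get_overall_status(components: List[Dict[str, Any]]) -> str:
--     """
--     Determine overall status based on component statuses.
--     """
--     if any(component["status"] == "error" for component in components):
--         return "error"
--
--     if any(component["status"] == "warning" for component in components):
--         return "warning"
--
--     if all(component["status"] == "ok" for component in components):
--         return "ok"
--
--     return "unknown"
-- ===== SOURCE B (Python) =====
-- def get_overall_status(components):
--     """
--     Determine overall status based on component statuses.
--     """
--     worst = "ok"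
--     for component in components:
--         status = component["status"]
--         if status == "error":
--             return "error"
--         if status == "warning":
--             worst = "warning"
--         elif status != "ok" and worst != "warning":
--             worst = "unknown"
--     return worst
-- ===== Notes on version B (the rewrite author's own statement) =====
-- stated objective: alternative
-- what changed: B replaces A's three separate any/any/all scans by a single left-to-right pass that keeps a worst-severity accumulator (error returns immediately, warning dominates unknown dominates ok).
import Mathlib
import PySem

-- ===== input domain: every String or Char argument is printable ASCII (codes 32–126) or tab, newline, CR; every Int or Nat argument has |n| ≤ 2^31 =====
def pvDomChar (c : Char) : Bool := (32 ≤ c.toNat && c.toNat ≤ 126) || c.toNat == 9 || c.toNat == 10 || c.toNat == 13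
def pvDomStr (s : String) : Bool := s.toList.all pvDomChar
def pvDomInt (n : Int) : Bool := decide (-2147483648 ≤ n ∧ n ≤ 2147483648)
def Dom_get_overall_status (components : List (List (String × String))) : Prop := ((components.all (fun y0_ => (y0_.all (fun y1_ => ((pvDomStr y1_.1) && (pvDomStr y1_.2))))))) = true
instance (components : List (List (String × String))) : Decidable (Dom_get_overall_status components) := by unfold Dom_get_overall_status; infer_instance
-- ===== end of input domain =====

-- B replaces A's three scans by one pass with a worst-severity accumulator (alternative decomposition, same cost).

-- component["status"]: first-match lookup on the association list (the dict convention); the "" default is only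
-- the total stand-in for a KeyError input, which Pre_ excludes from the claim.
def pvStatusD (c : List (String × String)) : String :=
  (((c.find? (fun p => p.1 == "status")).map (fun p => p.2)).getD "")

-- ===== PORT A =====
def get_overall_status (components : List (List (String × String))) : String :=
  if components.any (fun c => pvStatusD c == "error") then "error"
  else if components.any (fun c => pvStatusD c == "warning") then "warning"
  else if components.all (fun c => pvStatusD c == "ok") then "ok"
  else "unknown"

-- ===== PORT B =====
def get_overall_status_loop : List (List (String × String)) → String → String
  | [], worst => worst
  | c :: rest, worst =>
      let status := pvStatusD c
      if status == "error" then "error"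
      else if status == "warning" then get_overall_status_loop rest "warning"
      else if status != "ok" && worst != "warning" then get_overall_status_loop rest "unknown"
      else get_overall_status_loop rest worst

def get_overall_status_alt (components : List (List (String × String))) : String :=
  get_overall_status_loop components "ok"

-- ===== PRECONDITION & SPEC =====
-- Pre_ excludes exactly the inputs on which both Pythons raise KeyError: a component without a "status" key
-- that is reached before any component whose status is "error".
def Pre_get_overall_status (components : List (List (String × String))) : Prop :=
  (components.takeWhile (fun c => c.any (fun p => p.1 == "status"))).length = components.length ∨
  (components.takeWhile (fun c => c.any (fun p => p.1 == "status"))).any (fun c => pvStatusD c == "error") = true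
instance (components : List (List (String × String))) : Decidable (Pre_get_overall_status components) := by unfold Pre_get_overall_status; infer_instance
def pvWitness_get_overall_status : (List (List (String × String))) := [[("status", "ok")], [("status", "warning")]]

def Spec_get_overall_status (components : List (List (String × String))) (out : String) : Prop := out = get_overall_status_alt components
instance (components : List (List (String × String))) (out : String) : Decidable (Spec_get_overall_status components out) := by unfold Spec_get_overall_status; infer_instance

-- ===== CLAIM (what is proved, stated in full; the proofs are below) =====
def Claim_equal_get_overall_status : Prop := ∀ (components : List (List (String × String))), Dom_get_overall_status components → Pre_get_overall_status components → Spec_get_overall_status components (get_overall_status components)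

-- ===== LEMMAS AND PROOFS =====

lemma loop_warning (l : List (List (String × String))) :
    get_overall_status_loop l "warning" =
      if l.any (fun c => pvStatusD c == "error") then "error" else "warning" := by
  induction l with
  | nil => simp [get_overall_status_loop]
  | cons c rest ih =>
      simp only [get_overall_status_loop, List.any_cons]
      by_cases he : pvStatusD c == "error"
      · simp [he]
      · simp only [Bool.not_eq_true] at he
        by_cases hw : pvStatusD c == "warning" <;> simp [he, hw, ih]

lemma loop_unknown (l : List (List (String × String))) :
    get_overall_status_loop l "unknown" =
      if l.any (fun c => pvStatusD c == "error") then "error"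
      else if l.any (fun c => pvStatusD c == "warning") then "warning"
      else "unknown" := by
  induction l with
  | nil => simp [get_overall_status_loop]
  | cons c rest ih =>
      simp only [get_overall_status_loop, List.any_cons]
      by_cases he : pvStatusD c == "error"
      · simp [he]
      · simp only [Bool.not_eq_true] at he
        by_cases hw : pvStatusD c == "warning"
        · simp [he, hw, loop_warning]
        · simp only [Bool.not_eq_true] at hw
          by_cases ho : pvStatusD c == "ok" <;> simp [he, hw, ho, ih]

lemma loop_ok (l : List (List (String × String))) :
    get_overall_status_loop l "ok" =
      if l.any (fun c => pvStatusD c == "error") then "error"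
      else if l.any (fun c => pvStatusD c == "warning") then "warning"
      else if l.all (fun c => pvStatusD c == "ok") then "ok"
      else "unknown" := by
  induction l with
  | nil => simp [get_overall_status_loop]
  | cons c rest ih =>
      simp only [get_overall_status_loop, List.any_cons, List.all_cons]
      by_cases he : pvStatusD c == "error"
      · simp [he]
      · simp only [Bool.not_eq_true] at he
        by_cases hw : pvStatusD c == "warning"
        · simp [he, hw, loop_warning]
        · simp only [Bool.not_eq_true] at hw
          by_cases ho : pvStatusD c == "ok"
          · simp [he, hw, ho, ih]
            intro h
            exact absurd (by simpa using ho) h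
          · simp only [Bool.not_eq_true] at ho
            simp [he, hw, ho, loop_unknown]
            intro h
            rw [h] at ho
            simp at ho

-- ===== VERDICT (by name: the statement is the Claim_ definition above) =====
theorem get_overall_status_spec : Claim_equal_get_overall_status := by
  intro components _ _
  unfold Spec_get_overall_status get_overall_status get_overall_status_alt
  rw [loop_ok]
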